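-- pv_equiv track=rewrite | github.com/xiaojiou176-org/video-analysis-extract | apps/worker/worker/temporal/activities_delivery_policy.py | classify_delivery_error
-- ===== SOURCE A (Python) =====
-- def classify_delivery_error(error_message: str) -> str:
--     normalized = error_message.strip().lower()
--     if not normalized:
--         return "transient"
--
--     if "not configured" in normalized:
--         return "config_error"
--     if "401" in normalized or "403" in normalized or "unauthorized" in normalized:
--         return "auth"
--     if "429" in normalized or "rate limit" in normalized:
--         return "rate_limit"
--     if any(
--         token in normalized
--         for token in (
--             "timeout",
--             "timed out",
--             "connection",
--             "network",
--             "tempor",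
--             "dns",
--             "502",
--             "503",
--             "504",
--         )
--     ):
--         return "transient"
--     return "transient"
-- ===== SOURCE B (Python) =====
-- _TOKEN_PRIORITY = {
--     "not configured": 0,
--     "401": 1,
--     "403": 1,
--     "unauthorized": 1,
--     "429": 2,
--     "rate limit": 2,
-- }
--
-- _CATEGORIES = ("config_error", "auth", "rate_limit", "transient")
--
--
-- def classify_delivery_error(error_message: str) -> str:
--     normalized = error_message.strip().lower()
--     priority = min(
--         (p for token, p in _TOKEN_PRIORITY.items() if token in normalized),
--         default=len(_CATEGORIES) - 1,
--     )
--     return _CATEGORIES[priority]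
-- ===== Notes on version B (the rewrite author's own statement) =====
-- stated objective: alternative
-- what changed: Replaces the ordered if-chain of substring checks by a flat token-to-priority map: collect the priorities of ALL matching tokens, take their minimum (default = lowest priority), and index into the category array; precedence becomes arithmetic (min) instead of control flow (early return), and the redundant nine-token transient scan of A's fall-through branch disappears (6 substring searches instead of up to 15).
import Mathlib
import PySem

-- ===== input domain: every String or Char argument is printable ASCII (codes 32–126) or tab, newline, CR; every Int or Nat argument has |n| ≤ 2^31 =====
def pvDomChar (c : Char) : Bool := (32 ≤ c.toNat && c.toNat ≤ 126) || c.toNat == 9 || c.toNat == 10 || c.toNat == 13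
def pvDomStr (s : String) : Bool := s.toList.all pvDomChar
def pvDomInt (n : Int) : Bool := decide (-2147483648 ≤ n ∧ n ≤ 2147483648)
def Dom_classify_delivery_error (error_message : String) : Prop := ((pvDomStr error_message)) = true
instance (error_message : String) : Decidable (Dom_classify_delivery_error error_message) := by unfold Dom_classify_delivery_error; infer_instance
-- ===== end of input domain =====

-- B replaces A's ordered if-chain by a flat token->priority map: take the minimum priority among all matching tokens (default = transient) and index into the category array; same behaviour, precedence via min instead of control flow.


-- ===== PORT A =====
def classify_delivery_error (error_message : String) : String :=
  let normalized := PySem.Str.lower (PySem.Str.strip error_message)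
  if normalized = "" then "transient"
  else if PySem.Str.isIn "not configured" normalized then "config_error"
  else if PySem.Str.isIn "401" normalized || PySem.Str.isIn "403" normalized || PySem.Str.isIn "unauthorized" normalized then "auth"
  else if PySem.Str.isIn "429" normalized || PySem.Str.isIn "rate limit" normalized then "rate_limit"
  else if ["timeout", "timed out", "connection", "network", "tempor", "dns", "502", "503", "504"].any (fun token => PySem.Str.isIn token normalized) then "transient"
  else "transient"

-- ===== PORT B =====
-- Flat token -> priority map (insertion order irrelevant: selection is by min).
def pvTokenPriority : List (String × Int) :=
  [("not configured", 0),
   ("401", 1), ("403", 1), ("unauthorized", 1),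
   ("429", 2), ("rate limit", 2)]

def pvCategories : List String := ["config_error", "auth", "rate_limit", "transient"]

def classify_delivery_error_alt (error_message : String) : String :=
  let normalized := PySem.Str.lower (PySem.Str.strip error_message)
  let matched := (pvTokenPriority.filter (fun t => PySem.Str.isIn t.1 normalized)).map Prod.snd
  let priority := match PySem.List.min? matched (fun x => x) with
    | some m => m
    | none => (pvCategories.length : Int) - 1
  match PySem.List.pyGet? pvCategories priority with
  | some c => c
  | none => ""   -- unreachable: priority is always in [0, 3]

-- ===== PRECONDITION & SPEC =====
def Spec_classify_delivery_error (error_message : String) (out : String) : Prop := out = classify_delivery_error_alt error_message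
instance (error_message : String) (out : String) : Decidable (Spec_classify_delivery_error error_message out) := by unfold Spec_classify_delivery_error; infer_instance

-- ===== CLAIM (what is proved, stated in full; the proofs are below) =====
def Claim_equal_classify_delivery_error : Prop := ∀ (error_message : String), Dom_classify_delivery_error error_message → Spec_classify_delivery_error error_message (classify_delivery_error error_message)

-- ===== LEMMAS AND PROOFS =====

-- ===== VERDICT (by name: the statement is the Claim_ definition above) =====
theorem classify_delivery_error_spec : Claim_equal_classify_delivery_error := by
  intro s _
  unfold Spec_classify_delivery_error classify_delivery_error classify_delivery_error_alt pvTokenPriority pvCategories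
  set n := PySem.Str.lower (PySem.Str.strip s) with hn
  by_cases h0 : n = ""
  · rw [h0]; decide
  · cases h1 : PySem.Str.isIn "not configured" n <;>
    cases h2 : PySem.Str.isIn "401" n <;>
    cases h3 : PySem.Str.isIn "403" n <;>
    cases h4 : PySem.Str.isIn "unauthorized" n <;>
    cases h5 : PySem.Str.isIn "429" n <;>
    cases h6 : PySem.Str.isIn "rate limit" n <;>
    simp_all [List.filter, PySem.List.min?]
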